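-- pv_equiv track=rewrite | github.com/Jami-tsm/Word-Parsing-and-Cosine-Similarity | printedWords.py | printedWords
-- ===== SOURCE A (Python) =====
-- def printedWords(words):
--     """
--     Computes the total number of printed for each year
--     :param words:  A dictionary mapping words to dictionaries with years and counts.
--     :return: A list containing tuples (year, count total words) for each year for which data
--     exists. The list must be sorted in ascending order of year.
--     """
--     yearlyTotals: dict = {}
--     for word in words:
--         for year in words[word]:
--             if year not in yearlyTotals:
--                 yearlyTotals[year] = 0
--             yearlyTotals[year] += words[word][year]
--     yearlyTotalsList = [(y, c) for y, c in yearlyTotals.items()]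
--     yearlyTotalsList = sorted(yearlyTotalsList, key=lambda x: x[0], reverse=False)
--     return yearlyTotalsList
-- ===== SOURCE B (Python) =====
-- def printedWords(words):
--     """Same result as A: no dict accumulator; flatten, then per distinct year a direct sum."""
--     counts = [(year, c) for word in words for year, c in words[word].items()]
--     years = sorted(set(y for y, _ in counts))
--     return [(y, sum(c for yy, c in counts if yy == y)) for y in years]
-- ===== Notes on version B (the rewrite author's own statement) =====
-- stated objective: simpler
-- what changed: Replaces the mutable accumulator dict plus items-then-sort with a flatten / sorted-distinct-years / per-year direct summation pipeline (no dict at all).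
import Mathlib
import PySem

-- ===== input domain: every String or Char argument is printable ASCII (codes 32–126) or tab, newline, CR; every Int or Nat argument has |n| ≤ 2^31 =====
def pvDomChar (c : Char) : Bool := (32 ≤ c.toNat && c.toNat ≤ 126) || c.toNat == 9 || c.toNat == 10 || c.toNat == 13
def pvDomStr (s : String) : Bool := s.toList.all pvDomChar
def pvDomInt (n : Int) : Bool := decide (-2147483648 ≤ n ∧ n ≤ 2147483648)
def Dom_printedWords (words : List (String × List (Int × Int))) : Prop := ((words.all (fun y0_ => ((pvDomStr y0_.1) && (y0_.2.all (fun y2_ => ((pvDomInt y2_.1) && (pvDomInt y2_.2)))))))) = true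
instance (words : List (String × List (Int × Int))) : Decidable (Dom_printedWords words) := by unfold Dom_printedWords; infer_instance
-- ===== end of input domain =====

-- B avoids A's accumulator dict: it flattens the per-word year/count lists, sorts the distinct
-- years, and sums each year's counts directly (objective: simpler).

-- ===== PORT A =====
-- the body of A's inner loop: 'if year not in yearlyTotals: yearlyTotals[year] = 0; yearlyTotals[year] += words[word][year]'
def pwStep (d : PySem.Dict Int Int) (p : Int × Int) : PySem.Dict Int Int :=
  let d1 := if d.contains p.1 then d else d.insert p.1 0
  d1.insert p.1 (d1.getD p.1 0 + p.2)

def printedWords (words : List (String × List (Int × Int))) : List (Int × Int) :=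
  let yearlyTotals : PySem.Dict Int Int :=
    words.foldl (fun d wp => wp.2.foldl pwStep d) PySem.Dict.empty
  let yearlyTotalsList := yearlyTotals.items.map (fun p => (p.1, p.2))
  PySem.List.sorted yearlyTotalsList (fun x => x.1) false

-- ===== PORT B =====
def printedWords_alt (words : List (String × List (Int × Int))) : List (Int × Int) :=
  let counts := words.flatMap (fun wp => wp.2)
  let years := PySem.List.sorted (PySem.Set.ofList (counts.map (fun p => p.1))) (fun y => y) false
  years.map (fun y => (y, ((counts.filter (fun p => p.1 == y)).map (fun p => p.2)).sum))

-- ===== PRECONDITION & SPEC =====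
def Spec_printedWords (words : List (String × List (Int × Int))) (out : List (Int × Int)) : Prop := out = printedWords_alt words
instance (words : List (String × List (Int × Int))) (out : List (Int × Int)) : Decidable (Spec_printedWords words out) := by unfold Spec_printedWords; infer_instance

-- ===== CLAIM (what is proved, stated in full; the proofs are below) =====
def Claim_equal_printedWords : Prop := ∀ (words : List (String × List (Int × Int))), Dom_printedWords words → Spec_printedWords words (printedWords words)

-- ===== LEMMAS AND PROOFS =====

-- A's conditional 'initialise to 0, then add' step is a single overwrite-with-sum insert
theorem pwStep_eq (d : PySem.Dict Int Int) (p : Int × Int) :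
    pwStep d p = d.insert p.1 (d.getD p.1 0 + p.2) := by
  unfold pwStep
  by_cases h : d.contains p.1
  · simp [h]
  · simp only [Bool.not_eq_true] at h
    simp only [h, Bool.false_eq_true, if_false]
    rw [PySem.Dict.getD_insert_self, PySem.Dict.insert_insert_self,
        PySem.Dict.getD_of_not_contains d 0 h]

-- value invariant of A's accumulation loop
theorem foldAdd_getD (l : List (Int × Int)) (d : PySem.Dict Int Int) (y : Int) :
    (l.foldl (fun d p => d.insert p.1 (d.getD p.1 0 + p.2)) d).getD y 0
      = d.getD y 0 + ((l.filter (fun p => p.1 == y)).map (fun p => p.2)).sum := by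
  induction l generalizing d with
  | nil => simp
  | cons a l ih =>
    simp only [List.foldl_cons, ih, List.filter_cons]
    by_cases h : a.1 = y
    · simp [h]
      ring
    · simp [h]
      rw [PySem.Dict.getD_insert_of_ne]
      exact fun e => h e.symm

-- ===== VERDICT (by name: the statement is the Claim_ definition above) =====
theorem printedWords_spec : Claim_equal_printedWords := by
  intro words _
  unfold Spec_printedWords printedWords printedWords_alt
  simp only []
  -- name the flattened list and the final dict
  set flat : List (Int × Int) := words.flatMap (fun wp => wp.2) with hflat
  have hfold :
      words.foldl (fun d wp => wp.2.foldl pwStep d) PySem.Dict.empty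
        = flat.foldl (fun d p => d.insert p.1 (d.getD p.1 0 + p.2)) PySem.Dict.empty := by
    have hfn : pwStep = fun d p => d.insert p.1 (d.getD p.1 0 + p.2) :=
      funext fun d => funext fun p => pwStep_eq d p
    rw [hfn, hflat, List.foldl_flatMap]
  rw [hfold]
  set dF := flat.foldl (fun d p => d.insert p.1 (d.getD p.1 0 + p.2)) PySem.Dict.empty with hdF
  have hnodup : dF.keys.Nodup := by
    rw [hdF]
    exact PySem.Dict.nodup_keys_foldl_insert_key flat (fun p => p.1)
      (fun d p => d.getD p.1 0 + p.2) PySem.Dict.empty (by simp)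
  have hkeys : dF.keys = PySem.Set.ofList (flat.map (fun p => p.1)) := by
    rw [hdF, PySem.Dict.keys_foldl_insert_key]
    simp [PySem.Set.update_nil_left]
  have hval : ∀ y, dF.getD y 0 = ((flat.filter (fun p => p.1 == y)).map (fun p => p.2)).sum := by
    intro y; rw [hdF, foldAdd_getD]; simp
  have hitems : dF.items
      = (PySem.Set.ofList (flat.map (fun p => p.1))).map
          (fun y => (y, ((flat.filter (fun p => p.1 == y)).map (fun p => p.2)).sum)) := by
    rw [PySem.Dict.items_eq_map_keys dF hnodup 0, hkeys]
    exact List.map_congr_left (fun y _ => by rw [hval])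
  have hmapeta : dF.items.map (fun p => ((p.1 : Int), (p.2 : Int))) = dF.items := by
    simp
  rw [hmapeta, hitems]
  -- both sides are the same map over the same year set, one sorted before, one after
  apply PySem.List.sorted_eq_of_perm_of_pairwise_lt
  · exact List.Perm.map _ (PySem.List.sorted_perm _ _ _)
  · exact List.Pairwise.map _ (fun a b h => h)
      (PySem.List.sorted_ofList_pairwise_lt (flat.map (fun p => p.1)))
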